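-- pv_equiv track=rewrite | github.com/VicMCA/PythonSamples | revisao11_quantas-vogais-e-espacos.py | vogais
-- ===== SOURCE A (Python) =====
-- def vogais(string):
--     aeiou = {' ': 0, 'a': 0, 'e': 0, 'i': 0, 'o': 0, 'u': 0}
--
--     for x in string:
--         if x in aeiou.keys():
--             aeiou[x] += 1
--
--     resultado = (f'Vogal "a" aparece {aeiou["a"]} vezes\n'
--     +f'Vogal "e" aparece {aeiou["e"]} vezes\n'
--     +f'Vogal "i" aparece {aeiou["i"]} vezes\n'
--     +f'Vogal "o" aparece {aeiou["o"]} vezes\n'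
--     +f'Vogal "u" aparece {aeiou["u"]} vezes\n'
--     +f'A frase possui {aeiou[" "]} espaços')
--
--     return resultado
-- ===== SOURCE B (Python) =====
-- def vogais(string):
--     # sort-then-scan: sort the tracked characters, then read off each count
--     # as the length of its contiguous run in the sorted list.
--     restante = sorted(ch for ch in string if ch in ' aeiou')
--     counts = {}
--     while restante:
--         c = restante[0]
--         k = 1
--         while k < len(restante) and restante[k] == c:
--             k += 1
--         counts[c] = k
--         restante = restante[k:]
--     return (f'Vogal "a" aparece {counts.get("a", 0)} vezes\n'
--             f'Vogal "e" aparece {counts.get("e", 0)} vezes\n'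
--             f'Vogal "i" aparece {counts.get("i", 0)} vezes\n'
--             f'Vogal "o" aparece {counts.get("o", 0)} vezes\n'
--             f'Vogal "u" aparece {counts.get("u", 0)} vezes\n'
--             f'A frase possui {counts.get(" ", 0)} espaços')
-- ===== Notes on version B (the rewrite author's own statement) =====
-- stated objective: alternative
-- what changed: B filters the string to the six tracked characters, sorts them, and obtains each count by run-length grouping of the sorted list (sort-then-scan), instead of A's single-pass dict-accumulation loop.
import Mathlib
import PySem

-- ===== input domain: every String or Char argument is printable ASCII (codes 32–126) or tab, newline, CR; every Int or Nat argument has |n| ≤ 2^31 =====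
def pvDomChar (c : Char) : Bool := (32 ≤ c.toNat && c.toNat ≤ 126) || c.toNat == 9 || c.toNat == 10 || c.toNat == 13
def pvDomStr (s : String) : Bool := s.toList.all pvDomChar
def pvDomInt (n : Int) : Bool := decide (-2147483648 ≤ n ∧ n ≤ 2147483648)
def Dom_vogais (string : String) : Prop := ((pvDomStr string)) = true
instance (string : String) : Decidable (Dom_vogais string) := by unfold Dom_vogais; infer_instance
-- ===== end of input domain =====

-- B replaces A's single-pass dict-accumulation loop by filter + sort + run-length grouping of the sorted list (objective: alternative).

-- ===== PORT A =====
-- the counting loop: 'for x in string: if x in aeiou.keys(): aeiou[x] += 1'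
def vogaisLoop (d : PySem.Dict Char Int) (l : List Char) : PySem.Dict Char Int :=
  l.foldl (fun d x => if d.contains x then d.modify x 0 (· + 1) else d) d

def vogais (string : String) : String :=
  let aeiou : PySem.Dict Char Int :=
    PySem.Dict.ofList [(' ', 0), ('a', 0), ('e', 0), ('i', 0), ('o', 0), ('u', 0)]
  let aeiou := vogaisLoop aeiou string.toList
  "Vogal \"a\" aparece " ++ PySem.Int.toStr (aeiou.getD 'a' 0) ++ " vezes\n"
    ++ "Vogal \"e\" aparece " ++ PySem.Int.toStr (aeiou.getD 'e' 0) ++ " vezes\n"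
    ++ "Vogal \"i\" aparece " ++ PySem.Int.toStr (aeiou.getD 'i' 0) ++ " vezes\n"
    ++ "Vogal \"o\" aparece " ++ PySem.Int.toStr (aeiou.getD 'o' 0) ++ " vezes\n"
    ++ "Vogal \"u\" aparece " ++ PySem.Int.toStr (aeiou.getD 'u' 0) ++ " vezes\n"
    ++ "A frase possui " ++ PySem.Int.toStr (aeiou.getD ' ' 0) ++ " espaços"

-- ===== PORT B =====
-- B's outer while: peel off the head run of the sorted remainder and record its length.
-- The inner while counting 'k' is the length of the equal-to-head prefix, i.e. takeWhile/dropWhile.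
def vogaisRuns (d : PySem.Dict Char Int) (l : List Char) : PySem.Dict Char Int :=
  match l with
  | [] => d
  | c :: t =>
    let k : Int := 1 + (t.takeWhile (· == c)).length
    vogaisRuns (d.insert c k) (t.dropWhile (· == c))
termination_by l.length
decreasing_by
  simp only [List.length_cons]
  exact Nat.lt_succ_of_le (List.length_dropWhile_le _ _)

def vogais_alt (string : String) : String :=
  let restante := PySem.List.sorted
    (string.toList.filter (fun ch => ch ∈ [' ', 'a', 'e', 'i', 'o', 'u'])) (fun x => x) false
  let counts := vogaisRuns PySem.Dict.empty restante
  "Vogal \"a\" aparece " ++ PySem.Int.toStr (counts.getD 'a' 0) ++ " vezes\n"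
    ++ "Vogal \"e\" aparece " ++ PySem.Int.toStr (counts.getD 'e' 0) ++ " vezes\n"
    ++ "Vogal \"i\" aparece " ++ PySem.Int.toStr (counts.getD 'i' 0) ++ " vezes\n"
    ++ "Vogal \"o\" aparece " ++ PySem.Int.toStr (counts.getD 'o' 0) ++ " vezes\n"
    ++ "Vogal \"u\" aparece " ++ PySem.Int.toStr (counts.getD 'u' 0) ++ " vezes\n"
    ++ "A frase possui " ++ PySem.Int.toStr (counts.getD ' ' 0) ++ " espaços"

-- ===== PRECONDITION & SPEC =====
def Spec_vogais (string : String) (out : String) : Prop := out = vogais_alt string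
instance (string : String) (out : String) : Decidable (Spec_vogais string out) := by unfold Spec_vogais; infer_instance

-- ===== CLAIM (what is proved, stated in full; the proofs are below) =====
def Claim_equal_vogais : Prop := ∀ (string : String), Dom_vogais string → Spec_vogais string (vogais string)

-- ===== LEMMAS AND PROOFS =====

-- A's guarded counting loop: any key already in the dict ends with its old value plus its count in l.
theorem vogaisLoop_getD (l : List Char) (d : PySem.Dict Char Int) (v : Char)
    (hv : d.contains v = true) :
    (vogaisLoop d l).getD v 0 = d.getD v 0 + l.count v := by
  induction l generalizing d with
  | nil => simp [vogaisLoop]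
  | cons h t ih =>
    simp only [vogaisLoop, List.foldl_cons] at *
    by_cases hc : d.contains h = true
    · rw [hc, if_pos rfl]
      have hv' : (d.modify h 0 (· + 1)).contains v = true := by
        rw [PySem.Dict.contains_modify]; simp [hv]
      rw [ih _ hv', PySem.Dict.getD_modify]
      by_cases hveq : v = h
      · subst hveq; simp; ring
      · rw [if_neg hveq]
        simp [Ne.symm hveq]
    · rw [Bool.not_eq_true] at hc
      rw [hc, if_neg (by simp)]
      have hne : ¬ v = h := fun hh => by rw [hh] at hv; rw [hv] at hc; cases hc
      rw [ih _ hv]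
      simp [Ne.symm hne]

-- B's run-length grouping of a SORTED list: the recorded length of v's run is exactly v's count.
theorem vogaisRuns_getD (d : PySem.Dict Char Int) (l : List Char) (v : Char) :
    l.Pairwise (· ≤ ·) →
    (vogaisRuns d l).getD v 0 = if v ∈ l then (l.count v : Int) else d.getD v 0 := by
  induction d, l using vogaisRuns.induct with
  | case1 d => intro _; simp [vogaisRuns]
  | case2 d c t k ih =>
    intro hl
    have hsplit : t.takeWhile (· == c) ++ t.dropWhile (· == c) = t := List.takeWhile_append_dropWhile
    have htw : ∀ x ∈ t.takeWhile (· == c), x = c := by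
      intro x hx
      have := List.mem_takeWhile_imp hx
      simpa using this
    have hle : ∀ x ∈ t, c ≤ x := by
      intro x hx; exact (List.pairwise_cons.mp hl).1 x hx
    have hdw_pair : (t.dropWhile (· == c)).Pairwise (· ≤ ·) :=
      hl.sublist ((List.dropWhile_sublist _).cons _)
    have hcdw : c ∉ t.dropWhile (· == c) := by
      intro hmem
      cases hdw : t.dropWhile (· == c) with
      | nil => rw [hdw] at hmem; exact absurd hmem (List.not_mem_nil)
      | cons d0 rest =>
        have hd0ne : ¬ (d0 == c) = true := by
          have hne : t.dropWhile (· == c) ≠ [] := by simp [hdw]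
          have := List.head_dropWhile_not (fun x => x == c) hne
          simpa [hdw] using this
        have hd0ne' : d0 ≠ c := by simpa using hd0ne
        have hd0mem : d0 ∈ t := (List.dropWhile_sublist _).mem (by rw [hdw]; simp)
        have hcd0 : c < d0 := lt_of_le_of_ne (hle d0 hd0mem) (Ne.symm hd0ne')
        rw [hdw] at hmem
        rcases List.mem_cons.mp hmem with h1 | h1
        · exact absurd h1.symm hd0ne'
        · have hd0le : d0 ≤ c := by
            have := (List.pairwise_cons.mp (hdw ▸ hdw_pair)).1 c h1
            exact this
          exact absurd (lt_of_lt_of_le hcd0 hd0le) (lt_irrefl c)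
    rw [vogaisRuns, ih hdw_pair]
    by_cases hveq : v = c
    · subst hveq
      have hcnt0 : (t.dropWhile (· == v)).count v = 0 := List.count_eq_zero.mpr hcdw
      have hcnttw : (t.takeWhile (· == v)).count v = (t.takeWhile (· == v)).length :=
        List.count_eq_length.mpr (fun b hb => (htw b hb).symm)
      have hcntt : t.count v = (t.takeWhile (· == v)).length := by
        conv_lhs => rw [← hsplit]
        rw [List.count_append, hcnttw, hcnt0]
        omega
      simp only [if_neg hcdw, if_pos (List.mem_cons_self), List.count_cons_self,
        PySem.Dict.getD_insert_self, hcntt]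
      omega
    · have hvtw : v ∉ t.takeWhile (· == c) := fun h => hveq (htw v h)
      have hmem_iff : v ∈ c :: t ↔ v ∈ t.dropWhile (· == c) := by
        constructor
        · intro h
          rcases List.mem_cons.mp h with h1 | h1
          · exact absurd h1 hveq
          · rw [← hsplit] at h1
            rcases List.mem_append.mp h1 with h2 | h2
            · exact absurd h2 hvtw
            · exact h2
        · intro h
          exact List.mem_cons_of_mem _ ((List.dropWhile_sublist _).mem h)
      have hcnt_eq : (c :: t).count v = (t.dropWhile (· == c)).count v := by
        conv_lhs => rw [← hsplit]
        rw [List.count_cons, if_neg (fun h => hveq ((beq_iff_eq.mp h).symm)), List.count_append,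
          List.count_eq_zero.mpr hvtw]
        omega
      by_cases hvdw : v ∈ t.dropWhile (· == c)
      · rw [if_pos hvdw, if_pos (hmem_iff.mpr hvdw), hcnt_eq]
      · rw [if_neg hvdw, if_neg (fun h => hvdw (hmem_iff.mp h))]
        exact PySem.Dict.getD_insert_of_ne d k 0 hveq

-- B's whole pipeline (filter + sort + run-length) counts v in the string, for tracked v.
theorem vogais_alt_count (s : List Char) (v : Char)
    (hv : (v ∈ [' ', 'a', 'e', 'i', 'o', 'u'] : Bool) = true) :
    (vogaisRuns PySem.Dict.empty
      (PySem.List.sorted (s.filter (fun ch => ch ∈ [' ', 'a', 'e', 'i', 'o', 'u'])) (fun x => x) false)).getD v 0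
    = s.count v := by
  set p : Char → Bool := fun ch => (ch ∈ [' ', 'a', 'e', 'i', 'o', 'u'] : Bool) with hp
  set srt := PySem.List.sorted (s.filter p) (fun x => x) false with hsrt
  have hpair : srt.Pairwise (· ≤ ·) := by
    have := PySem.List.sorted_pairwise (xs := s.filter p) (key := fun x => x)
    simpa [hsrt] using this
  have hperm : srt.Perm (s.filter p) := PySem.List.sorted_perm _ _ _
  have hcnt : srt.count v = s.count v := by
    rw [hperm.count_eq, List.count_filter (by simpa [hp] using hv)]
  rw [vogaisRuns_getD _ srt v hpair]
  by_cases hmem : v ∈ srt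
  · rw [if_pos hmem, hcnt]
  · rw [if_neg hmem]
    have : s.count v = 0 := by
      rw [← hcnt]; exact List.count_eq_zero.mpr hmem
    simp [this]

-- ===== VERDICT (by name: the statement is the Claim_ definition above) =====
theorem vogais_spec : Claim_equal_vogais := by
  intro s _
  unfold Spec_vogais vogais vogais_alt
  simp only [
    vogais_alt_count s.toList 'a' (by decide),
    vogais_alt_count s.toList 'e' (by decide),
    vogais_alt_count s.toList 'i' (by decide),
    vogais_alt_count s.toList 'o' (by decide),
    vogais_alt_count s.toList 'u' (by decide),
    vogais_alt_count s.toList ' ' (by decide),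
    vogaisLoop_getD s.toList (PySem.Dict.ofList [(' ', (0:Int)), ('a', 0), ('e', 0), ('i', 0), ('o', 0), ('u', 0)]) 'a' (by decide),
    vogaisLoop_getD s.toList (PySem.Dict.ofList [(' ', (0:Int)), ('a', 0), ('e', 0), ('i', 0), ('o', 0), ('u', 0)]) 'e' (by decide),
    vogaisLoop_getD s.toList (PySem.Dict.ofList [(' ', (0:Int)), ('a', 0), ('e', 0), ('i', 0), ('o', 0), ('u', 0)]) 'i' (by decide),
    vogaisLoop_getD s.toList (PySem.Dict.ofList [(' ', (0:Int)), ('a', 0), ('e', 0), ('i', 0), ('o', 0), ('u', 0)]) 'o' (by decide),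
    vogaisLoop_getD s.toList (PySem.Dict.ofList [(' ', (0:Int)), ('a', 0), ('e', 0), ('i', 0), ('o', 0), ('u', 0)]) 'u' (by decide),
    vogaisLoop_getD s.toList (PySem.Dict.ofList [(' ', (0:Int)), ('a', 0), ('e', 0), ('i', 0), ('o', 0), ('u', 0)]) ' ' (by decide),
    show (PySem.Dict.ofList [(' ', (0:Int)), ('a', 0), ('e', 0), ('i', 0), ('o', 0), ('u', 0)]).getD 'a' 0 = 0 from by decide,
    show (PySem.Dict.ofList [(' ', (0:Int)), ('a', 0), ('e', 0), ('i', 0), ('o', 0), ('u', 0)]).getD 'e' 0 = 0 from by decide,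
    show (PySem.Dict.ofList [(' ', (0:Int)), ('a', 0), ('e', 0), ('i', 0), ('o', 0), ('u', 0)]).getD 'i' 0 = 0 from by decide,
    show (PySem.Dict.ofList [(' ', (0:Int)), ('a', 0), ('e', 0), ('i', 0), ('o', 0), ('u', 0)]).getD 'o' 0 = 0 from by decide,
    show (PySem.Dict.ofList [(' ', (0:Int)), ('a', 0), ('e', 0), ('i', 0), ('o', 0), ('u', 0)]).getD 'u' 0 = 0 from by decide,
    show (PySem.Dict.ofList [(' ', (0:Int)), ('a', 0), ('e', 0), ('i', 0), ('o', 0), ('u', 0)]).getD ' ' 0 = 0 from by decide,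
    zero_add]
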